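-- pv_equiv track=rewrite | github.com/cooneycw/AgenticAi | src_code/debug_logger.py | _determine_level
-- ===== SOURCE A (Python) =====
-- def _determine_level(message: str) -> str:
--     """Determine appropriate log level based on message content."""
--     message_upper = message.upper()
--
--     if any(word in message_upper for word in ["AGENT-", "CLIMATE-", "WORKFLOW:"]):
--         return "AGENT"
--     elif any(word in message_upper for word in ["TEMP-FORECAST:", "CLIMATE-DECISION:"]):
--         return "CLIMATE"
--     elif any(word in message_upper for word in ["REASONING:"]):
--         return "REASONING"
--     elif any(word in message_upper for word in ["SUCCESS:", "COMPLETE", "GENERATED"]):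
--         return "SUCCESS"
--     elif any(word in message_upper for word in ["ERROR:", "FAILED", "CRITICAL"]):
--         return "ERROR"
--     elif any(word in message_upper for word in ["WARNING:", "WARN:"]):
--         return "WARN"
--     else:
--         return "INFO"
-- ===== SOURCE B (Python) =====
-- # One left-to-right scan of the uppercased message: at each position, match all
-- # keywords starting there and keep the best (lowest) priority seen; index into
-- # the level table at the end.  (A instead runs one substring search per keyword,
-- # level by level.)
-- KEYWORD_PRIORITY = {
--     "AGENT-": 0, "CLIMATE-": 0, "WORKFLOW:": 0,
--     "TEMP-FORECAST:": 1, "CLIMATE-DECISION:": 1,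
--     "REASONING:": 2,
--     "SUCCESS:": 3, "COMPLETE": 3, "GENERATED": 3,
--     "ERROR:": 4, "FAILED": 4, "CRITICAL": 4,
--     "WARNING:": 5, "WARN:": 5,
-- }
-- LEVELS = ["AGENT", "CLIMATE", "REASONING", "SUCCESS", "ERROR", "WARN", "INFO"]
--
-- def _determine_level(message: str) -> str:
--     """Determine appropriate log level based on message content."""
--     u = message.upper()
--     best = 6
--     for i in range(len(u)):
--         for kw, p in KEYWORD_PRIORITY.items():
--             if p < best and u.startswith(kw, i):
--                 best = p
--     return LEVELS[best]
-- ===== Notes on version B (the rewrite author's own statement) =====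
-- stated objective: alternative
-- what changed: Replaced the per-keyword substring searches of the if/elif chain by a single position-by-position scan of the uppercased message that matches every keyword at each offset and keeps the minimum priority, indexing a level table at the end.
import Mathlib
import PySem

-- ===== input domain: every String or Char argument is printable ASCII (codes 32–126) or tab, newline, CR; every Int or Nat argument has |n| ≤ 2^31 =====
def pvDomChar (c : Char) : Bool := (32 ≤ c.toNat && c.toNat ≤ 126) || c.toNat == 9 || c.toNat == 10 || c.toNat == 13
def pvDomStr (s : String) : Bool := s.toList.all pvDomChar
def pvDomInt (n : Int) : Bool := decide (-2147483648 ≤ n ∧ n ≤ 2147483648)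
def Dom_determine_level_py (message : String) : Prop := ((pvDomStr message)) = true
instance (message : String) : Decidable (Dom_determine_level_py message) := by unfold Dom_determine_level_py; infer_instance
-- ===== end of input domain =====

-- B replaces A's keyword-by-keyword substring searches with one position-by-position scan of the
-- uppercased message keeping the minimum matched priority (alternative algorithm, same cost).

-- ===== PORT A =====
-- literal transliteration of the if/elif chain
def determine_level_py (message : String) : String :=
  let message_upper := PySem.Str.upper message
  if ["AGENT-", "CLIMATE-", "WORKFLOW:"].any (fun word => PySem.Str.isIn word message_upper) then
    "AGENT"
  else if ["TEMP-FORECAST:", "CLIMATE-DECISION:"].any (fun word => PySem.Str.isIn word message_upper) then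
    "CLIMATE"
  else if ["REASONING:"].any (fun word => PySem.Str.isIn word message_upper) then
    "REASONING"
  else if ["SUCCESS:", "COMPLETE", "GENERATED"].any (fun word => PySem.Str.isIn word message_upper) then
    "SUCCESS"
  else if ["ERROR:", "FAILED", "CRITICAL"].any (fun word => PySem.Str.isIn word message_upper) then
    "ERROR"
  else if ["WARNING:", "WARN:"].any (fun word => PySem.Str.isIn word message_upper) then
    "WARN"
  else
    "INFO"

-- ===== PORT B =====
-- the KEYWORD_PRIORITY dict (insertion order) and the LEVELS table of Source B
def pvKeywords : List (String × Nat) :=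
  [("AGENT-", 0), ("CLIMATE-", 0), ("WORKFLOW:", 0),
   ("TEMP-FORECAST:", 1), ("CLIMATE-DECISION:", 1),
   ("REASONING:", 2),
   ("SUCCESS:", 3), ("COMPLETE", 3), ("GENERATED", 3),
   ("ERROR:", 4), ("FAILED", 4), ("CRITICAL", 4),
   ("WARNING:", 5), ("WARN:", 5)]

def pvLevels : List String := ["AGENT", "CLIMATE", "REASONING", "SUCCESS", "ERROR", "WARN", "INFO"]

-- transliteration of Source B: 'for i in range(len(u))' is List.range over the (nonnegative) length;
-- 'u.startswith(kw, i)' is exact as startswith on u[i:] since 0 ≤ i ≤ len(u);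
-- 'LEVELS[best]' via getD is exact since best ≤ 6 = len(LEVELS) - 1 throughout.
def determine_level_py_alt (message : String) : String :=
  let u := PySem.Str.upper message
  let best := (List.range u.toList.length).foldl (fun best i =>
    pvKeywords.foldl (fun best kwp =>
      if kwp.2 < best ∧ PySem.Chars.startswith (u.toList.drop i) kwp.1.toList then kwp.2 else best)
      best) 6
  pvLevels.getD best "INFO"

-- ===== PRECONDITION & SPEC =====
def Spec_determine_level_py (message : String) (out : String) : Prop := out = determine_level_py_alt message
instance (message : String) (out : String) : Decidable (Spec_determine_level_py message out) := by unfold Spec_determine_level_py; infer_instance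

-- ===== CLAIM (what is proved, stated in full; the proofs are below) =====
def Claim_equal_determine_level_py : Prop := ∀ (message : String), Dom_determine_level_py message → Spec_determine_level_py message (determine_level_py message)

-- ===== LEMMAS AND PROOFS =====

-- value contributed by keyword kwp at position i of cs
def pvVal (cs : List Char) (i : Nat) (kwp : String × Nat) : Nat :=
  if PySem.Chars.startswith (cs.drop i) kwp.1.toList then kwp.2 else 6

-- minimum priority matched at position i (over the keyword table)
def pvCkw (cs : List Char) (i : Nat) (kws : List (String × Nat)) : Nat :=
  kws.foldr (fun kwp a => min (pvVal cs i kwp) a) 6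

-- minimum priority matched over a list of positions
def pvCpos (cs : List Char) (is : List Nat) : Nat :=
  is.foldr (fun i a => min (pvCkw cs i pvKeywords) a) 6

lemma pvCkw_le_six (cs : List Char) (i : Nat) (kws : List (String × Nat)) :
    pvCkw cs i kws ≤ 6 := by
  induction kws with
  | nil => simp [pvCkw]
  | cons x xs ih => simp only [pvCkw, List.foldr] at *; omega

lemma pvCpos_le_six (cs : List Char) (is : List Nat) : pvCpos cs is ≤ 6 := by
  induction is with
  | nil => simp [pvCpos]
  | cons x xs ih => simp only [pvCpos, List.foldr] at *; omega

lemma pv_inner_fold (cs : List Char) (i : Nat) (kws : List (String × Nat)) :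
    ∀ b : Nat, b ≤ 6 →
    kws.foldl (fun best kwp =>
      if kwp.2 < best ∧ PySem.Chars.startswith (cs.drop i) kwp.1.toList then kwp.2 else best) b
      = min b (pvCkw cs i kws) := by
  induction kws with
  | nil => intro b hb; simp [pvCkw]; omega
  | cons x xs ih =>
    intro b hb
    simp only [List.foldl, pvCkw, List.foldr]
    have hstep : (if x.2 < b ∧ PySem.Chars.startswith (cs.drop i) x.1.toList then x.2 else b)
        = min b (pvVal cs i x) := by
      unfold pvVal
      cases hsb : PySem.Chars.startswith (cs.drop i) x.1.toList <;> simp <;> first | omega | (split_ifs <;> omega)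
    rw [hstep, ih _ (by omega)]
    have := pvCkw_le_six cs i xs
    unfold pvCkw
    omega

lemma pv_outer_fold (cs : List Char) (is : List Nat) :
    ∀ b : Nat, b ≤ 6 →
    is.foldl (fun best i =>
      pvKeywords.foldl (fun best kwp =>
        if kwp.2 < best ∧ PySem.Chars.startswith (cs.drop i) kwp.1.toList then kwp.2 else best)
        best) b
      = min b (pvCpos cs is) := by
  induction is with
  | nil => intro b hb; simp [pvCpos]; omega
  | cons x xs ih =>
    intro b hb
    simp only [List.foldl, pvCpos, List.foldr]
    rw [pv_inner_fold cs x pvKeywords b hb, ih _ (by omega)]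
    have := pvCkw_le_six cs x pvKeywords
    have := pvCpos_le_six cs xs
    unfold pvCpos
    omega

lemma pvCkw_le_iff (cs : List Char) (i : Nat) (kws : List (String × Nat)) (k : Nat) :
    pvCkw cs i kws ≤ k ↔ 6 ≤ k ∨ ∃ kwp ∈ kws, PySem.Chars.startswith (cs.drop i) kwp.1.toList = true ∧ kwp.2 ≤ k := by
  induction kws with
  | nil => simp [pvCkw]
  | cons x xs ih =>
    simp only [pvCkw, List.foldr, min_le_iff] at *
    constructor
    · rintro (h | h)
      · unfold pvVal at h
        split_ifs at h with hs
        · exact Or.inr ⟨x, by simp, hs, h⟩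
        · exact Or.inl (by omega)
      · rcases ih.mp h with h | ⟨kwp, hm, hs, hk⟩
        · exact Or.inl h
        · exact Or.inr ⟨kwp, by simp [hm], hs, hk⟩
    · rintro (h | ⟨kwp, hm, hs, hk⟩)
      · exact Or.inr (ih.mpr (Or.inl h))
      · rcases List.mem_cons.mp hm with rfl | hm
        · exact Or.inl (by unfold pvVal; simp [hs]; omega)
        · exact Or.inr (ih.mpr (Or.inr ⟨kwp, hm, hs, hk⟩))

lemma pvCpos_le_iff (cs : List Char) (is : List Nat) (k : Nat) :
    pvCpos cs is ≤ k ↔ 6 ≤ k ∨ ∃ i ∈ is, pvCkw cs i pvKeywords ≤ k := by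
  induction is with
  | nil => simp [pvCpos]
  | cons x xs ih =>
    simp only [pvCpos, List.foldr, min_le_iff] at *
    constructor
    · rintro (h | h)
      · exact Or.inr ⟨x, by simp, h⟩
      · rcases ih.mp h with h | ⟨i, hm, hi⟩
        · exact Or.inl h
        · exact Or.inr ⟨i, by simp [hm], hi⟩
    · rintro (h | ⟨i, hm, hi⟩)
      · exact Or.inr (ih.mpr (Or.inl h))
      · rcases List.mem_cons.mp hm with rfl | hm
        · exact Or.inl hi
        · exact Or.inr (ih.mpr (Or.inr ⟨i, hm, hi⟩))

-- keyword containment ↔ a bounded starting position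
lemma pv_isIn_iff (kw cs : List Char) (hkw : kw ≠ []) :
    PySem.Chars.isIn kw cs = true ↔ ∃ i < cs.length, PySem.Chars.startswith (cs.drop i) kw = true := by
  rw [← PySem.Chars.exists_prefix_drop_iff_isIn]
  constructor
  · rintro ⟨j, hj⟩
    have hjlt : j < cs.length := by
      by_contra h
      rw [List.drop_eq_nil_of_le (by omega)] at hj
      exact hkw (List.prefix_nil.mp hj)
    exact ⟨j, hjlt, (PySem.Chars.startswith_iff _ _).mpr hj⟩
  · rintro ⟨i, _, hs⟩
    exact ⟨i, (PySem.Chars.startswith_iff _ _).mp hs⟩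

-- level p is matched: some keyword of priority p occurs in cs
def pvM (cs : List Char) (p : Nat) : Prop :=
  ∃ kwp ∈ pvKeywords, kwp.2 = p ∧ PySem.Chars.isIn kwp.1.toList cs = true

lemma pv_kw_ne : ∀ kwp ∈ pvKeywords, kwp.1.toList ≠ [] := by decide

lemma pvC_le_iff (cs : List Char) (k : Nat) :
    pvCpos cs (List.range cs.length) ≤ k ↔ 6 ≤ k ∨ ∃ p ≤ k, pvM cs p := by
  rw [pvCpos_le_iff]
  constructor
  · rintro (h | ⟨i, hi, hck⟩)
    · exact Or.inl h
    rcases (pvCkw_le_iff cs i pvKeywords k).mp hck with h | ⟨kwp, hm, hs, hk⟩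
    · exact Or.inl h
    · exact Or.inr ⟨kwp.2, hk, kwp, hm, rfl,
        (pv_isIn_iff kwp.1.toList cs (pv_kw_ne kwp hm)).mpr ⟨i, List.mem_range.mp hi, hs⟩⟩
  · rintro (h | ⟨p, hp, kwp, hm, rfl, hin⟩)
    · exact Or.inl h
    rcases (pv_isIn_iff kwp.1.toList cs (pv_kw_ne kwp hm)).mp hin with ⟨i, hi, hs⟩
    exact Or.inr ⟨i, List.mem_range.mpr hi,
      (pvCkw_le_iff cs i pvKeywords k).mpr (Or.inr ⟨kwp, hm, hs, hp⟩)⟩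

lemma pvM_iff (cs : List Char) (p : Nat) :
    pvM cs p ↔ ∃ w ∈ (pvKeywords.filter (fun kwp => kwp.2 == p)).map (·.1),
      PySem.Chars.isIn w.toList cs = true := by
  constructor
  · rintro ⟨kwp, hm, hp, hin⟩
    exact ⟨kwp.1, List.mem_map.mpr ⟨kwp, List.mem_filter.mpr ⟨hm, by simp [hp]⟩, rfl⟩, hin⟩
  · rintro ⟨w, hw, hin⟩
    rcases List.mem_map.mp hw with ⟨kwp, hf, rfl⟩
    rcases List.mem_filter.mp hf with ⟨hm, hp⟩
    exact ⟨kwp, hm, by simpa using hp, hin⟩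

-- the whole equivalence, stated on the uppercased character list
lemma pv_main (cs : List Char) :
    (if ["AGENT-", "CLIMATE-", "WORKFLOW:"].any (fun w => PySem.Chars.isIn w.toList cs) then "AGENT"
     else if ["TEMP-FORECAST:", "CLIMATE-DECISION:"].any (fun w => PySem.Chars.isIn w.toList cs) then "CLIMATE"
     else if ["REASONING:"].any (fun w => PySem.Chars.isIn w.toList cs) then "REASONING"
     else if ["SUCCESS:", "COMPLETE", "GENERATED"].any (fun w => PySem.Chars.isIn w.toList cs) then "SUCCESS"
     else if ["ERROR:", "FAILED", "CRITICAL"].any (fun w => PySem.Chars.isIn w.toList cs) then "ERROR"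
     else if ["WARNING:", "WARN:"].any (fun w => PySem.Chars.isIn w.toList cs) then "WARN"
     else "INFO")
    = pvLevels.getD (pvCpos cs (List.range cs.length)) "INFO" := by
  set C := pvCpos cs (List.range cs.length) with hCdef
  have hC6 : C ≤ 6 := pvCpos_le_six cs (List.range cs.length)
  have hM : ∀ p : Nat, pvM cs p ↔
      ((pvKeywords.filter (fun kwp => kwp.2 == p)).map (·.1)).any
        (fun w => PySem.Chars.isIn w.toList cs) = true := by
    intro p; rw [pvM_iff]; simp [List.any_eq_true]
  -- the six branch conditions, as pvM
  have h0 : (["AGENT-", "CLIMATE-", "WORKFLOW:"].any (fun w => PySem.Chars.isIn w.toList cs) = true) ↔ pvM cs 0 := by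
    rw [hM 0]; rfl
  have h1 : (["TEMP-FORECAST:", "CLIMATE-DECISION:"].any (fun w => PySem.Chars.isIn w.toList cs) = true) ↔ pvM cs 1 := by
    rw [hM 1]; rfl
  have h2 : (["REASONING:"].any (fun w => PySem.Chars.isIn w.toList cs) = true) ↔ pvM cs 2 := by
    rw [hM 2]; rfl
  have h3 : (["SUCCESS:", "COMPLETE", "GENERATED"].any (fun w => PySem.Chars.isIn w.toList cs) = true) ↔ pvM cs 3 := by
    rw [hM 3]; rfl
  have h4 : (["ERROR:", "FAILED", "CRITICAL"].any (fun w => PySem.Chars.isIn w.toList cs) = true) ↔ pvM cs 4 := by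
    rw [hM 4]; rfl
  have h5 : (["WARNING:", "WARN:"].any (fun w => PySem.Chars.isIn w.toList cs) = true) ↔ pvM cs 5 := by
    rw [hM 5]; rfl
  have hle : ∀ k : Nat, C ≤ k ↔ 6 ≤ k ∨ ∃ p ≤ k, pvM cs p := fun k => pvC_le_iff cs k
  have hCeq : ∀ v : Nat, v ≤ 6 → pvM cs v → (∀ q < v, ¬ pvM cs q) → C = v := by
    intro v hv hMv hNone
    have hub : C ≤ v := (hle v).mpr (Or.inr ⟨v, le_refl v, hMv⟩)
    by_contra hne
    have hlt : C ≤ v - 1 := by omega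
    rcases (hle (v - 1)).mp hlt with h | ⟨p, hp, hMp⟩
    · omega
    · have : p < v := by omega
      exact hNone p this hMp
  have hC6eq : (∀ q < 6, ¬ pvM cs q) → C = 6 := by
    intro hNone
    by_contra hne
    have hlt : C ≤ 5 := by omega
    rcases (hle 5).mp hlt with h | ⟨p, hp, hMp⟩
    · omega
    · exact hNone p (by omega) hMp
  by_cases b0 : ["AGENT-", "CLIMATE-", "WORKFLOW:"].any (fun w => PySem.Chars.isIn w.toList cs) = true
  · rw [if_pos b0, hCeq 0 (by omega) (h0.mp b0) (by omega)]; rfl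
  rw [if_neg b0]
  have m0 := fun h => b0 (h0.mpr h)
  by_cases b1 : ["TEMP-FORECAST:", "CLIMATE-DECISION:"].any (fun w => PySem.Chars.isIn w.toList cs) = true
  · rw [if_pos b1, hCeq 1 (by omega) (h1.mp b1) (by intro q hq; interval_cases q; exact m0)]; rfl
  rw [if_neg b1]
  have m1 := fun h => b1 (h1.mpr h)
  by_cases b2 : ["REASONING:"].any (fun w => PySem.Chars.isIn w.toList cs) = true
  · rw [if_pos b2, hCeq 2 (by omega) (h2.mp b2) (by intro q hq; interval_cases q; exacts [m0, m1])]; rfl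
  rw [if_neg b2]
  have m2 := fun h => b2 (h2.mpr h)
  by_cases b3 : ["SUCCESS:", "COMPLETE", "GENERATED"].any (fun w => PySem.Chars.isIn w.toList cs) = true
  · rw [if_pos b3, hCeq 3 (by omega) (h3.mp b3) (by intro q hq; interval_cases q; exacts [m0, m1, m2])]; rfl
  rw [if_neg b3]
  have m3 := fun h => b3 (h3.mpr h)
  by_cases b4 : ["ERROR:", "FAILED", "CRITICAL"].any (fun w => PySem.Chars.isIn w.toList cs) = true
  · rw [if_pos b4, hCeq 4 (by omega) (h4.mp b4) (by intro q hq; interval_cases q; exacts [m0, m1, m2, m3])]; rfl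
  rw [if_neg b4]
  have m4 := fun h => b4 (h4.mpr h)
  by_cases b5 : ["WARNING:", "WARN:"].any (fun w => PySem.Chars.isIn w.toList cs) = true
  · rw [if_pos b5, hCeq 5 (by omega) (h5.mp b5) (by intro q hq; interval_cases q; exacts [m0, m1, m2, m3, m4])]; rfl
  rw [if_neg b5]
  have m5 := fun h => b5 (h5.mpr h)
  rw [hC6eq (by intro q hq; interval_cases q; exacts [m0, m1, m2, m3, m4, m5])]
  rfl

-- ===== VERDICT (by name: the statement is the Claim_ definition above) =====
theorem determine_level_py_spec : Claim_equal_determine_level_py := by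
  intro message _
  unfold Spec_determine_level_py determine_level_py determine_level_py_alt
  have hB := pv_outer_fold ((PySem.Str.upper message).toList)
      (List.range ((PySem.Str.upper message).toList.length)) 6 (by omega)
  have h6 := pvCpos_le_six ((PySem.Str.upper message).toList)
      (List.range ((PySem.Str.upper message).toList.length))
  simp only [hB, PySem.Str.isIn_eq, Nat.min_eq_right h6]
  exact pv_main ((PySem.Str.upper message).toList)
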